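-- pv_equiv track=rewrite | github.com/KobekingLu/AI-Engineering-Decision-Agent | decision_agent/io_utils.py | _infer_lifecycle_flags
-- ===== SOURCE A (Python) =====
-- def _coerce_source_texts(source: str | list[tuple[str, str]]) -> list[tuple[str, str]]:
--     if isinstance(source, str):
--         return [("combined_text", source)] if source.strip() else []
--     return [(field, text) for field, text in source if str(text).strip()]
--
-- def _infer_lifecycle_flags(source: str | list[tuple[str, str]]) -> dict[str, bool]:
--     signal_items = _extract_lifecycle_signal_items(source)
--     signal_types = {item.get("signal_type", "") for item in signal_items}
--     return {
--         "has_root_cause_signal": "root-cause signal" in signal_types,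
--         "has_solution_signal": "solution/fix signal" in signal_types,
--         "has_verification_signal": "verification signal" in signal_types,
--         "has_pass_signal": "PASS signal" in signal_types,
--     }
--
-- def _extract_lifecycle_signal_items(source: str | list[tuple[str, str]]) -> list[dict[str, str]]:
--     signal_patterns = [
--         ("root-cause signal", ["root cause", "this issue cause by", "cause by"]),
--         (
--             "solution/fix signal",
--             [
--                 "solution",
--                 "to fix this issue",
--                 "fixed by",
--                 "reworked sample",
--                 "replacement board",
--                 "board change",
--                 "bios config update",
--                 "config update",
--                 "0 ohm",
--             ],
--         ),
--         ("verification signal", ["ready for dqa test", "verifying", "verification", "retest", "verify"]),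
--         ("PASS signal", ["retest pass", "stable pass", "test result is pass", "verified", "pass"]),
--     ]
--     items: list[dict[str, str]] = []
--     seen: set[tuple[str, str, str]] = set()
--     for source_field, text in _coerce_source_texts(source):
--         lowered = text.lower()
--         for signal_type, tokens in signal_patterns:
--             for token in tokens:
--                 if token in lowered:
--                     key = (signal_type, token, source_field)
--                     if key in seen:
--                         break
--                     seen.add(key)
--                     items.append(
--                         {
--                             "signal_type": signal_type,
--                             "source_field": source_field,
--                             "matched_text": token,
--                             "matched_excerpt": _build_excerpt(text, token),
--                         }
--                     )
--                     break
--     return items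
--
-- def _build_excerpt(text: str, token: str, max_chars: int = 140) -> str:
--     lowered = text.lower()
--     token_lower = token.lower()
--     index = lowered.find(token_lower)
--     if index < 0:
--         compact = " ".join(text.split())
--         return compact[:max_chars] + ("..." if len(compact) > max_chars else "")
--     start = max(0, index - 45)
--     end = min(len(text), index + len(token) + 65)
--     excerpt = " ".join(text[start:end].split())
--     if start > 0:
--         excerpt = "..." + excerpt
--     if end < len(text):
--         excerpt = excerpt + "..."
--     return excerpt
-- ===== SOURCE B (Python) =====
-- def _coerce_source_texts(source):
--     if isinstance(source, str):
--         return [("combined_text", source)] if source.strip() else []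
--     return [(field, text) for field, text in source if str(text).strip()]
--
-- _FLAG_TOKENS = [
--     ("has_root_cause_signal", ("root cause", "this issue cause by", "cause by")),
--     ("has_solution_signal", ("solution", "to fix this issue", "fixed by", "reworked sample",
--                              "replacement board", "board change", "bios config update",
--                              "config update", "0 ohm")),
--     ("has_verification_signal", ("ready for dqa test", "verifying", "verification", "retest", "verify")),
--     ("has_pass_signal", ("retest pass", "stable pass", "test result is pass", "verified", "pass")),
-- ]
--
-- def _infer_lifecycle_flags(source):
--     lowered = [str(text).lower() for _, text in _coerce_source_texts(source)]
--     return {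
--         flag: any(token in text for text in lowered for token in tokens)
--         for flag, tokens in _FLAG_TOKENS
--     }
-- ===== Notes on version B (the rewrite author's own statement) =====
-- stated objective: simpler
-- what changed: B drops A's signal-item extraction entirely (excerpt building, seen-set dedup, per-item dicts, set of types) and instead tests each of the four flags directly as 'some token is a substring of some lowered coerced text'.
import Mathlib
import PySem

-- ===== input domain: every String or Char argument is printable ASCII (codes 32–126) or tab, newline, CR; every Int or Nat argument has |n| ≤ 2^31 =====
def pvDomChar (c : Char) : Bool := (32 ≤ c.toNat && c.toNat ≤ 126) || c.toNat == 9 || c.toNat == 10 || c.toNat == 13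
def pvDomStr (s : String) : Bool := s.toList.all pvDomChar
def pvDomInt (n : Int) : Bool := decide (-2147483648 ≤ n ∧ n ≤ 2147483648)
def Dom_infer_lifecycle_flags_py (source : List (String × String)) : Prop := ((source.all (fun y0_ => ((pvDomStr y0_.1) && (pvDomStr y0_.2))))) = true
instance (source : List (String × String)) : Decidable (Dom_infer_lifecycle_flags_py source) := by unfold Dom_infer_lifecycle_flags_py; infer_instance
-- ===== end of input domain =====

-- B replaces A's signal-item extraction (excerpt building, seen-set dedup, item dicts)
-- by a direct per-flag substring test over the lowered coerced texts; objective: simpler.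

-- ===== PORT A =====
-- _coerce_source_texts, list branch (the Lean signature fixes the list input)
def pvCoerceTexts (source : List (String × String)) : List (String × String) :=
  source.filter (fun p => PySem.Str.strip p.2 != "")

-- _build_excerpt (default max_chars = 140 passed explicitly at the call site)
def pvBuildExcerpt (text token : String) (max_chars : Int) : String :=
  let lowered := PySem.Str.lower text
  let token_lower := PySem.Str.lower token
  let index := PySem.Str.find lowered token_lower
  if index < 0 then
    let compact := PySem.Str.join " " (PySem.Str.split₀ text)
    PySem.Str.slice compact none (some max_chars) ++
      (if max_chars < (PySem.Str.len compact : Int) then "..." else "")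
  else
    let start := max 0 (index - 45)
    let stop := min ((PySem.Str.len text : Int)) (index + (PySem.Str.len token : Int) + 65)
    let excerpt := PySem.Str.join " " (PySem.Str.split₀ (PySem.Str.slice text (some start) (some stop)))
    let excerpt := if 0 < start then "..." ++ excerpt else excerpt
    let excerpt := if stop < (PySem.Str.len text : Int) then excerpt ++ "..." else excerpt
    excerpt

def pvSignalPatterns : List (String × List String) :=
  [("root-cause signal", ["root cause", "this issue cause by", "cause by"]),
   ("solution/fix signal",
     ["solution", "to fix this issue", "fixed by", "reworked sample", "replacement board",
      "board change", "bios config update", "config update", "0 ohm"]),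
   ("verification signal", ["ready for dqa test", "verifying", "verification", "retest", "verify"]),
   ("PASS signal", ["retest pass", "stable pass", "test result is pass", "verified", "pass"])]

-- inner 'for token in tokens: … break' loop of _extract_lifecycle_signal_items
def pvTokenLoop (tokens : List String) (sigType field text lowered : String)
    (st : List (PySem.Dict String String) × PySem.Set (String × String × String)) :
    List (PySem.Dict String String) × PySem.Set (String × String × String) :=
  match tokens with
  | [] => st
  | token :: rest =>
    if PySem.Str.isIn token lowered then
      if PySem.Set.contains st.2 (sigType, token, field) then st
      else (st.1 ++ [PySem.Dict.ofList
              [("signal_type", sigType), ("source_field", field),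
               ("matched_text", token), ("matched_excerpt", pvBuildExcerpt text token 140)]],
            PySem.Set.add st.2 (sigType, token, field))
    else pvTokenLoop rest sigType field text lowered st

-- _extract_lifecycle_signal_items
def pvExtractItems (source : List (String × String)) : List (PySem.Dict String String) :=
  ((pvCoerceTexts source).foldl
    (fun st p =>
      let lowered := PySem.Str.lower p.2
      pvSignalPatterns.foldl (fun st pat => pvTokenLoop pat.2 pat.1 p.1 p.2 lowered st) st)
    ([], PySem.Set.empty)).1

def infer_lifecycle_flags_py (source : List (String × String)) : List (String × Bool) :=
  let signal_items := pvExtractItems source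
  let signal_types : PySem.Set String :=
    PySem.Set.ofList (signal_items.map (fun item => PySem.Dict.getD item "signal_type" ""))
  [("has_root_cause_signal", PySem.Set.contains signal_types "root-cause signal"),
   ("has_solution_signal", PySem.Set.contains signal_types "solution/fix signal"),
   ("has_verification_signal", PySem.Set.contains signal_types "verification signal"),
   ("has_pass_signal", PySem.Set.contains signal_types "PASS signal")]

-- ===== PORT B =====
def pvFlagTokens : List (String × List String) :=
  [("has_root_cause_signal", ["root cause", "this issue cause by", "cause by"]),
   ("has_solution_signal",
     ["solution", "to fix this issue", "fixed by", "reworked sample", "replacement board",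
      "board change", "bios config update", "config update", "0 ohm"]),
   ("has_verification_signal", ["ready for dqa test", "verifying", "verification", "retest", "verify"]),
   ("has_pass_signal", ["retest pass", "stable pass", "test result is pass", "verified", "pass"])]

def infer_lifecycle_flags_py_alt (source : List (String × String)) : List (String × Bool) :=
  let lowered := (source.filter (fun p => PySem.Str.strip p.2 != "")).map (fun p => PySem.Str.lower p.2)
  pvFlagTokens.map (fun g =>
    (g.1, lowered.any (fun text => g.2.any (fun token => PySem.Str.isIn token text))))

-- ===== PRECONDITION & SPEC =====
def Spec_infer_lifecycle_flags_py (source : List (String × String)) (out : List (String × Bool)) : Prop := out = infer_lifecycle_flags_py_alt source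
instance (source : List (String × String)) (out : List (String × Bool)) : Decidable (Spec_infer_lifecycle_flags_py source out) := by unfold Spec_infer_lifecycle_flags_py; infer_instance

-- ===== CLAIM (what is proved, stated in full; the proofs are below) =====
def Claim_equal_infer_lifecycle_flags_py : Prop := ∀ (source : List (String × String)), Dom_infer_lifecycle_flags_py source → Spec_infer_lifecycle_flags_py source (infer_lifecycle_flags_py source)

-- ===== LEMMAS AND PROOFS =====

-- the "signal_type" value of every item A appends
def pvGetTy (it : PySem.Dict String String) : String := PySem.Dict.getD it "signal_type" ""

theorem pvGetTy_item (T f tok e : String) :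
    pvGetTy (PySem.Dict.ofList
      [("signal_type", T), ("source_field", f), ("matched_text", tok), ("matched_excerpt", e)]) = T := by
  simp [pvGetTy, PySem.Dict.ofList, PySem.Dict.update, PySem.Dict.insert, PySem.Dict.getD,
    PySem.Dict.get?, PySem.Dict.empty, PySem.Dict.contains]

theorem pvTokenLoop_spec (tokens : List String) (T f text lowered : String)
    (st : List (PySem.Dict String String) × PySem.Set (String × String × String))
    (hP : ∀ k ∈ st.2, k.1 ∈ st.1.map pvGetTy) :
    (∀ k ∈ (pvTokenLoop tokens T f text lowered st).2,
        k.1 ∈ (pvTokenLoop tokens T f text lowered st).1.map pvGetTy) ∧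
    (∀ T', T' ∈ (pvTokenLoop tokens T f text lowered st).1.map pvGetTy ↔
        T' ∈ st.1.map pvGetTy ∨ (T' = T ∧ ∃ tok ∈ tokens, PySem.Str.isIn tok lowered = true)) := by
  induction tokens with
  | nil => exact ⟨hP, fun T' => by simp [pvTokenLoop]⟩
  | cons token rest ih =>
    by_cases hin : PySem.Str.isIn token lowered = true
    · by_cases hseen : PySem.Set.contains st.2 (T, token, f) = true
      · have heq : pvTokenLoop (token :: rest) T f text lowered st = st := by
          unfold pvTokenLoop; rw [if_pos hin, if_pos hseen]
        rw [heq]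
        have hT : T ∈ st.1.map pvGetTy := hP _ ((PySem.Set.contains_iff st.2 _).mp hseen)
        refine ⟨hP, fun T' => ⟨Or.inl, ?_⟩⟩
        rintro (h | ⟨rfl, _⟩)
        · exact h
        · exact hT
      · have heq : pvTokenLoop (token :: rest) T f text lowered st =
            (st.1 ++ [PySem.Dict.ofList
              [("signal_type", T), ("source_field", f),
               ("matched_text", token), ("matched_excerpt", pvBuildExcerpt text token 140)]],
             PySem.Set.add st.2 (T, token, f)) := by
          unfold pvTokenLoop; rw [if_pos hin, if_neg (by simpa using hseen)]
        rw [heq]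
        constructor
        · intro k hk
          rcases (PySem.Set.mem_add st.2 _ k).mp hk with h | rfl
          · exact by simpa using Or.inl (hP _ h)
          · simp [pvGetTy_item]
        · intro T'
          simp only [List.map_append, List.map_cons, List.map_nil, List.mem_append,
            List.mem_cons, List.not_mem_nil, or_false, pvGetTy_item]
          constructor
          · rintro (h | rfl)
            · exact Or.inl h
            · exact Or.inr ⟨rfl, token, Or.inl rfl, hin⟩
          · rintro (h | ⟨rfl, tok, _, _⟩)
            · exact Or.inl h
            · exact Or.inr rfl
    · have heq : pvTokenLoop (token :: rest) T f text lowered st =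
          pvTokenLoop rest T f text lowered st := by
        conv_lhs => unfold pvTokenLoop; rw [if_neg hin]
      rw [heq]
      refine ⟨ih.1, fun T' => ?_⟩
      rw [ih.2 T']
      constructor
      · rintro (h | ⟨rfl, tok, htok, hm⟩)
        · exact Or.inl h
        · exact Or.inr ⟨rfl, tok, List.mem_cons_of_mem _ htok, hm⟩
      · rintro (h | ⟨rfl, tok, htok, hm⟩)
        · exact Or.inl h
        · rcases List.mem_cons.mp htok with rfl | htok'
          · exact absurd hm hin
          · exact Or.inr ⟨rfl, tok, htok', hm⟩

theorem pvPatLoop_spec (pats : List (String × List String)) (f text lowered : String)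
    (st : List (PySem.Dict String String) × PySem.Set (String × String × String))
    (hP : ∀ k ∈ st.2, k.1 ∈ st.1.map pvGetTy) :
    (∀ k ∈ (pats.foldl (fun st pat => pvTokenLoop pat.2 pat.1 f text lowered st) st).2,
        k.1 ∈ (pats.foldl (fun st pat => pvTokenLoop pat.2 pat.1 f text lowered st) st).1.map pvGetTy) ∧
    (∀ T', T' ∈ (pats.foldl (fun st pat => pvTokenLoop pat.2 pat.1 f text lowered st) st).1.map pvGetTy ↔
        T' ∈ st.1.map pvGetTy ∨ ∃ pat ∈ pats, T' = pat.1 ∧ ∃ tok ∈ pat.2, PySem.Str.isIn tok lowered = true) := by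
  induction pats generalizing st with
  | nil => exact ⟨hP, fun T' => by simp⟩
  | cons pat rest ih =>
    have h1 := pvTokenLoop_spec pat.2 pat.1 f text lowered st hP
    have h2 := ih (pvTokenLoop pat.2 pat.1 f text lowered st) h1.1
    refine ⟨by simpa using h2.1, ?_⟩
    intro T'
    simp only [List.foldl_cons]
    rw [h2.2 T', h1.2 T']
    constructor
    · rintro ((h | ⟨rfl, tok, htok, hm⟩) | ⟨q, hq, rfl, tok, htok, hm⟩)
      · exact Or.inl h
      · exact Or.inr ⟨pat, List.mem_cons_self .., rfl, tok, htok, hm⟩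
      · exact Or.inr ⟨q, List.mem_cons_of_mem _ hq, rfl, tok, htok, hm⟩
    · rintro (h | ⟨q, hq, rfl, tok, htok, hm⟩)
      · exact Or.inl (Or.inl h)
      · rcases List.mem_cons.mp hq with rfl | hq'
        · exact Or.inl (Or.inr ⟨rfl, tok, htok, hm⟩)
        · exact Or.inr ⟨q, hq', rfl, tok, htok, hm⟩

theorem pvExtract_spec (cs : List (String × String))
    (st : List (PySem.Dict String String) × PySem.Set (String × String × String))
    (hP : ∀ k ∈ st.2, k.1 ∈ st.1.map pvGetTy) :
    (∀ k ∈ (cs.foldl (fun st p =>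
        pvSignalPatterns.foldl (fun st pat => pvTokenLoop pat.2 pat.1 p.1 p.2 (PySem.Str.lower p.2) st) st) st).2,
        k.1 ∈ (cs.foldl (fun st p =>
        pvSignalPatterns.foldl (fun st pat => pvTokenLoop pat.2 pat.1 p.1 p.2 (PySem.Str.lower p.2) st) st) st).1.map pvGetTy) ∧
    (∀ T', T' ∈ (cs.foldl (fun st p =>
        pvSignalPatterns.foldl (fun st pat => pvTokenLoop pat.2 pat.1 p.1 p.2 (PySem.Str.lower p.2) st) st) st).1.map pvGetTy ↔
        T' ∈ st.1.map pvGetTy ∨ ∃ p ∈ cs, ∃ pat ∈ pvSignalPatterns, T' = pat.1 ∧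
          ∃ tok ∈ pat.2, PySem.Str.isIn tok (PySem.Str.lower p.2) = true) := by
  induction cs generalizing st with
  | nil => exact ⟨hP, fun T' => by simp⟩
  | cons c rest ih =>
    have h1 := pvPatLoop_spec pvSignalPatterns c.1 c.2 (PySem.Str.lower c.2) st hP
    have h2 := ih _ h1.1
    refine ⟨by simpa using h2.1, ?_⟩
    intro T'
    simp only [List.foldl_cons]
    rw [h2.2 T', h1.2 T']
    constructor
    · rintro ((h | h) | ⟨p, hp, hrest⟩)
      · exact Or.inl h
      · exact Or.inr ⟨c, List.mem_cons_self .., h⟩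
      · exact Or.inr ⟨p, List.mem_cons_of_mem _ hp, hrest⟩
    · rintro (h | ⟨p, hp, hrest⟩)
      · exact Or.inl (Or.inl h)
      · rcases List.mem_cons.mp hp with rfl | hp'
        · exact Or.inl (Or.inr hrest)
        · exact Or.inr ⟨p, hp', hrest⟩

-- the characterisation of A's signal_types set
theorem pvTypes_mem (source : List (String × String)) (T' : String) :
    T' ∈ (pvExtractItems source).map pvGetTy ↔
      ∃ p ∈ pvCoerceTexts source, ∃ pat ∈ pvSignalPatterns, T' = pat.1 ∧
        ∃ tok ∈ pat.2, PySem.Str.isIn tok (PySem.Str.lower p.2) = true := by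
  have h := pvExtract_spec (pvCoerceTexts source) ([], PySem.Set.empty) (by simp [PySem.Set.empty])
  simpa [pvExtractItems] using h.2 T'

-- ===== VERDICT (by name: the statement is the Claim_ definition above) =====
theorem infer_lifecycle_flags_py_spec : Claim_equal_infer_lifecycle_flags_py := by
  intro source _
  unfold Spec_infer_lifecycle_flags_py
  show infer_lifecycle_flags_py source = infer_lifecycle_flags_py_alt source
  have key : ∀ (T : String) (toks : List String), (T, toks) ∈ pvSignalPatterns →
      (∀ pat ∈ pvSignalPatterns, T = pat.1 → pat.2 = toks) →
      (PySem.Set.contains (PySem.Set.ofList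
          ((pvExtractItems source).map (fun item => PySem.Dict.getD item "signal_type" ""))) T
        = ((source.filter (fun p => PySem.Str.strip p.2 != "")).map (fun p => PySem.Str.lower p.2)).any
            (fun text => toks.any (fun token => PySem.Str.isIn token text))) := by
    intro T toks hpat huniq
    rw [Bool.eq_iff_iff]
    rw [show (fun item => PySem.Dict.getD item "signal_type" "") = pvGetTy from rfl]
    constructor
    · intro h
      have h1 : T ∈ (pvExtractItems source).map pvGetTy :=
        (PySem.Set.mem_ofList _ _).mp ((PySem.Set.contains_iff _ _).mp h)
      rcases (pvTypes_mem source T).mp h1 with ⟨p, hp, pat, hpatmem, heq, tok, htok, hm⟩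
      have := huniq pat hpatmem heq
      subst this
      rw [List.any_eq_true]
      exact ⟨PySem.Str.lower p.2, List.mem_map.mpr ⟨p, hp, rfl⟩,
        List.any_eq_true.mpr ⟨tok, htok, hm⟩⟩
    · intro h
      rcases List.any_eq_true.mp h with ⟨text, htext, hany⟩
      rcases List.mem_map.mp htext with ⟨p, hp, rfl⟩
      rcases List.any_eq_true.mp hany with ⟨tok, htok, hm⟩
      refine (PySem.Set.contains_iff _ _).mpr ((PySem.Set.mem_ofList _ _).mpr
        ((pvTypes_mem source T).mpr ⟨p, hp, (T, toks), hpat, rfl, tok, htok, hm⟩))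
  unfold infer_lifecycle_flags_py infer_lifecycle_flags_py_alt pvFlagTokens
  simp only [List.map_cons, List.map_nil]
  refine congrArg₂ _ (congrArg _ ?_) (congrArg₂ _ (congrArg _ ?_)
    (congrArg₂ _ (congrArg _ ?_) (congrArg₂ _ (congrArg _ ?_) rfl)))
  · exact key "root-cause signal" _ (by simp [pvSignalPatterns]) (by decide)
  · exact key "solution/fix signal" _ (by simp [pvSignalPatterns]) (by decide)
  · exact key "verification signal" _ (by simp [pvSignalPatterns]) (by decide)
  · exact key "PASS signal" _ (by simp [pvSignalPatterns]) (by decide)
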